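-- pv_equiv track=rewrite | github.com/sriramb2000/CM122-S21 | ch9/9.10/sol.py | bwtQuery
-- ===== SOURCE A (Python) =====
-- def bwtQuery(text, query) -> int:
--     temp = [i[0] for i in sorted(enumerate(list(text)), key=lambda x:x[1])]
--     l2f = {}
--     for f, l in enumerate(temp):
--         l2f[l] = f
--     first = 0
--     last = len(text) - 1
--     while query:
--         cur = query[-1]
--         tf, tl = text.find(cur, first, last+1), text.rfind(cur, first, last+1)
--         if tf == -1 or tl == -1:
--             return 0
--         first, last = l2f[tf], l2f[tl]
--         query = query[:-1]
--
--     return last - first + 1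
-- ===== SOURCE B (Python) =====
-- def _lb(ps, x, lo, hi):
--     # index of the first element of sorted ps[lo:hi] that is >= x (binary search)
--     if lo >= hi:
--         return lo
--     mid = (lo + hi) // 2
--     if ps[mid] < x:
--         return _lb(ps, x, mid + 1, hi)
--     return _lb(ps, x, lo, mid)
--
--
-- def bwtQuery(text, query) -> int:
--     # positions of each character, in increasing order
--     occ = {}
--     for i, ch in enumerate(text):
--         occ.setdefault(ch, []).append(i)
--     # start[ch] = number of characters in text strictly smaller than ch
--     start = {}
--     total = 0
--     for ch in sorted(occ):
--         start[ch] = total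
--         total += len(occ[ch])
--     first, last = 0, len(text) - 1
--     for ch in reversed(query):
--         ps = occ.get(ch)
--         if ps is None:
--             return 0
--         i = _lb(ps, first, 0, len(ps))
--         j = _lb(ps, last + 1, 0, len(ps))
--         if i >= j:
--             return 0
--         first = start[ch] + i
--         last = start[ch] + j - 1
--     return last - first + 1
-- ===== Notes on version B (the rewrite author's own statement) =====
-- stated objective: alternative
-- what changed: B replaces A's per-query-character text.find/rfind scans and the sorted-enumerate rank dictionary by an FM-index backward search: it builds per-character sorted position lists and a cumulative 'number of smaller characters' table once, then answers each step with two hand-written binary searches; intended as asymptotically better (O(log n) vs O(n) per query character), but A's C-speed str.find was measured at only 1.22x slower at the largest size, so no speed is claimed.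
import Mathlib
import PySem

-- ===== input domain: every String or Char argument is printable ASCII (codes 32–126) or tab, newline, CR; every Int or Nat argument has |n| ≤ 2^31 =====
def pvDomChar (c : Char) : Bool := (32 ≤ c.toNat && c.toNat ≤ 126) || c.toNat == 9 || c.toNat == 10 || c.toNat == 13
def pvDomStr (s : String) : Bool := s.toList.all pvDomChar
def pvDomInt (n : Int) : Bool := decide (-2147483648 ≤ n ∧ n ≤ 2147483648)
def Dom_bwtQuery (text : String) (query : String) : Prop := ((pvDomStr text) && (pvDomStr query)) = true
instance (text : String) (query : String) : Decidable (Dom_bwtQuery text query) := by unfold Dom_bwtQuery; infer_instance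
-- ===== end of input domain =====

-- B is the FM-index backward search: per-character sorted position lists with binary search
-- instead of A's per-step text.find/rfind scans; equal return value on the whole domain.

-- ===== PORT A =====

-- the while-loop of A: cur = query[-1]; tf/tl = text.find/rfind(cur, first, last+1); query = query[:-1]
-- (l2f[tf] / l2f[tl] ported with getD: every key 0..len(text)-1 is present in l2f, so no KeyError)
def bwtLoopA (cs : List Char) (l2f : PySem.Dict Int Int) (q : List Char) (first last : Int) : Int :=
  if h : q = [] then last - first + 1
  else
    let cur := q.getLast h
    let tf := PySem.Chars.findFrom cs [cur] first (some (last + 1))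
    let tl := PySem.Chars.rfindFrom cs [cur] first (some (last + 1))
    if tf = -1 ∨ tl = -1 then 0
    else bwtLoopA cs l2f q.dropLast (l2f.getD tf 0) (l2f.getD tl 0)
termination_by q.length
decreasing_by
  have : 0 < q.length := List.length_pos_iff.mpr h
  simp [List.length_dropLast]; omega

def bwtQuery (text : String) (query : String) : Int :=
  let cs := text.toList
  let temp : List Int :=
    (PySem.List.sorted (PySem.List.enumerate cs 0) (fun x => x.2) false).map (fun p => p.1)
  let l2f : PySem.Dict Int Int :=
    (PySem.List.enumerate temp 0).foldl (fun d p => d.insert p.2 p.1) PySem.Dict.empty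
  bwtLoopA cs l2f query.toList 0 ((cs.length : Int) - 1)

-- ===== PORT B =====

-- _lb(ps, x, lo, hi): first index in sorted ps[lo:hi] whose element is >= x (binary search);
-- ps[mid] ported with pyGetD: every reachable call keeps 0 <= lo <= mid < hi <= len(ps)
def bwtLb (ps : List Int) (x lo hi : Int) : Int :=
  if lo ≥ hi then lo
  else
    let mid := PySem.Int.floordiv (lo + hi) 2
    if PySem.List.pyGetD ps mid 0 < x then bwtLb ps x (mid + 1) hi
    else bwtLb ps x lo mid
termination_by (hi - lo).toNat
decreasing_by
  · have h1 := PySem.Int.floordiv_two_mid_bounds (lo := lo) (hi := hi) (by omega)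
    omega
  · have h1 := PySem.Int.floordiv_two_mid_bounds (lo := lo) (hi := hi) (by omega)
    have h2 : PySem.Int.floordiv (lo + hi) 2 < hi :=
      (PySem.Int.floordiv_lt_iff_lt_mul (by omega)).mpr (by omega)
    omega

-- the for-loop of B over reversed(query), with its two early returns
def bwtLoopB (occ : PySem.Dict Char (List Int)) (start : PySem.Dict Char Int)
    (q : List Char) (first last : Int) : Int :=
  match q with
  | [] => last - first + 1
  | ch :: rest =>
    match occ.get? ch with
    | none => 0
    | some ps =>
      let i := bwtLb ps first 0 (ps.length : Int)
      let j := bwtLb ps (last + 1) 0 (ps.length : Int)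
      if i ≥ j then 0
      else bwtLoopB occ start rest (start.getD ch 0 + i) (start.getD ch 0 + j - 1)

def bwtQuery_alt (text : String) (query : String) : Int :=
  let cs := text.toList
  let occ : PySem.Dict Char (List Int) :=
    (PySem.List.enumerate cs 0).foldl
      (fun d p => d.modify p.2 [] (fun v => v ++ [p.1])) PySem.Dict.empty
  let start : PySem.Dict Char Int :=
    ((PySem.List.sorted occ.keys (fun x => x) false).foldl
      (fun st ch => (st.1.insert ch st.2, st.2 + ((occ.getD ch []).length : Int)))
      (PySem.Dict.empty, 0)).1
  bwtLoopB occ start query.toList.reverse 0 ((cs.length : Int) - 1)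

-- ===== PRECONDITION & SPEC =====
def Spec_bwtQuery (text : String) (query : String) (out : Int) : Prop := out = bwtQuery_alt text query
instance (text : String) (query : String) (out : Int) : Decidable (Spec_bwtQuery text query out) := by unfold Spec_bwtQuery; infer_instance

-- ===== CLAIM (what is proved, stated in full; the proofs are below) =====
def Claim_equal_bwtQuery : Prop := ∀ (text : String) (query : String), Dom_bwtQuery text query → Spec_bwtQuery text query (bwtQuery text query)

-- ===== LEMMAS AND PROOFS =====

-- proof-side names for the data structures both ports build over cs = text.toList
def posL (cs : List Char) (c : Char) : List Int :=
  ((PySem.List.enumerate cs 0).filter (fun p => p.2 == c)).map (fun p => p.1)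

def cntLT (cs : List Char) (c : Char) : Nat := cs.countP (fun x => decide (x < c))

def tempF (cs : List Char) : List Int :=
  (PySem.List.sorted (PySem.List.enumerate cs 0) (fun x => x.2) false).map (fun p => p.1)

def l2fF (cs : List Char) : PySem.Dict Int Int :=
  (PySem.List.enumerate (tempF cs) 0).foldl (fun d p => d.insert p.2 p.1) PySem.Dict.empty

def occF (cs : List Char) : PySem.Dict Char (List Int) :=
  (PySem.List.enumerate cs 0).foldl
    (fun d p => d.modify p.2 [] (fun v => v ++ [p.1])) PySem.Dict.empty

def startF (cs : List Char) : PySem.Dict Char Int :=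
  ((PySem.List.sorted (occF cs).keys (fun x => x) false).foldl
    (fun st ch => (st.1.insert ch st.2, st.2 + (((occF cs).getD ch []).length : Int)))
    (PySem.Dict.empty, 0)).1


theorem charToNat_inj (a b : Char) (h : a.toNat = b.toNat) : a = b := by
  apply Char.ext
  exact UInt32.toNat_inj.mp h

theorem char_lt_iff_toNat (a b : Char) : a < b ↔ a.toNat < b.toNat := by
  rw [Char.lt_def]; exact gt_iff_lt

theorem insertBy_cons {α : Type} (before : α → α → Bool) (x y : α) (ys : List α) :
    PySem.List.insertBy before x (y :: ys) =
      if before x y then x :: y :: ys else y :: PySem.List.insertBy before x ys := rfl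

theorem insertBy_append_skip {α : Type} (before : α → α → Bool) (x : α) (as bs : List α)
    (h : ∀ a ∈ as, before x a = false) :
    PySem.List.insertBy before x (as ++ bs) = as ++ PySem.List.insertBy before x bs := by
  induction as with
  | nil => simp
  | cons a t ih =>
    rw [List.cons_append, insertBy_cons, h a List.mem_cons_self]
    simp only [Bool.false_eq_true, if_false, List.cons_append]
    rw [ih (fun a ha => h a (List.mem_cons_of_mem _ ha))]

theorem insertBy_front {α : Type} (before : α → α → Bool) (x : α) (l : List α)
    (h : ∀ a ∈ l, before x a = true) :
    PySem.List.insertBy before x l = x :: l := by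
  cases l with
  | nil => rfl
  | cons a t => rw [insertBy_cons, h a List.mem_cons_self]; simp

-- inserting an element whose bucket is listed: it lands at the end of its bucket
theorem insert_grouped (x : Int × Char) (ds : List Nat) (g : Nat → List (Int × Char))
    (hds : ds.Pairwise (· < ·)) (hmem : x.2.toNat ∈ ds)
    (hg : ∀ k ∈ ds, ∀ p ∈ g k, p.2.toNat = k) :
    PySem.List.insertBy (fun a b => decide (a.2 < b.2)) x (ds.flatMap g) =
      ds.flatMap (fun k => if k = x.2.toNat then g k ++ [x] else g k) := by
  induction ds with
  | nil => simp at hmem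
  | cons k t ih =>
    have hkt : ∀ j ∈ t, k < j := fun j hj => List.rel_of_pairwise_cons hds hj
    rw [List.flatMap_cons, List.flatMap_cons]
    by_cases hk : k = x.2.toNat
    · subst hk
      have hskip : ∀ a ∈ g x.2.toNat, (fun a b => decide (a.2 < b.2)) x a = false := by
        intro a ha
        have h1 : a.2.toNat = x.2.toNat := hg _ List.mem_cons_self a ha
        have h2 : a.2 = x.2 := charToNat_inj _ _ h1
        simp [h2]
      rw [insertBy_append_skip _ _ _ _ hskip]
      have hxt : x.2.toNat ∉ t := by
        intro hc; exact absurd (hkt _ hc) (by omega)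
      have hfront : PySem.List.insertBy (fun a b => decide (a.2 < b.2)) x (t.flatMap g) =
          x :: t.flatMap g := by
        apply insertBy_front
        intro a ha
        rcases List.mem_flatMap.mp ha with ⟨j, hj, haj⟩
        have h1 : a.2.toNat = j := hg _ (List.mem_cons_of_mem _ hj) a haj
        have h2 : x.2.toNat < a.2.toNat := by rw [h1]; exact hkt _ hj
        simp only [decide_eq_true_eq]
        exact (char_lt_iff_toNat _ _).mpr h2
      rw [hfront]
      have htg : t.flatMap (fun j => if j = x.2.toNat then g j ++ [x] else g j) = t.flatMap g := by
        apply List.flatMap_congr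
        intro j hj
        exact if_neg (fun h => hxt (by rw [← h]; exact hj))
      rw [if_pos rfl, htg]
      simp
    · have hskip2 : ∀ a ∈ g k, (fun a b => decide (a.2 < b.2)) x a = false := by
        intro a ha
        have h1 : a.2.toNat = k := hg _ List.mem_cons_self a ha
        have h2 : k < x.2.toNat := by
          rcases List.mem_cons.mp hmem with h | h
          · exact absurd h.symm hk
          · exact hkt _ h
        have h3 : a.2 < x.2 := (char_lt_iff_toNat _ _).mpr (by rw [h1]; exact h2)
        simp only [decide_eq_true_eq]
        simp [not_lt.mpr (le_of_lt h3)]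
      rw [insertBy_append_skip _ _ _ _ hskip2, if_neg hk]
      rw [ih hds.of_cons (by rcases List.mem_cons.mp hmem with h | h; exact absurd h.symm hk; exact h)
        (fun j hj => hg j (List.mem_cons_of_mem _ hj))]



theorem singleton_isPrefixOf_cons (c a : Char) (t : List Char) :
    [c].isPrefixOf (a :: t) = (c == a) := by
  simp only [List.isPrefixOf, Bool.and_true]

theorem findgo_eq (c : Char) (w : List Char) : ∀ k : Nat,
    PySem.Chars.find.go [c] w k = if c ∈ w then ((k : Int) + w.idxOf c) else -1 := by
  induction w with
  | nil => intro k; simp [PySem.Chars.find.go]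
  | cons a t ih =>
    intro k
    rw [PySem.Chars.find.go, singleton_isPrefixOf_cons]
    by_cases hac : c = a
    · subst hac; simp [List.idxOf_cons]
    · have : (c == a) = false := by simp [hac]
      rw [this]
      simp only [Bool.false_eq_true, if_false, ih (k + 1), List.mem_cons]
      rcases Decidable.em (c ∈ t) with h | h
      · simp [h, hac, List.idxOf_cons, Ne.symm hac]
        push_cast; ring
      · simp [h, hac]

theorem find_singleton (c : Char) (w : List Char) :
    PySem.Chars.find w [c] = if c ∈ w then (w.idxOf c : Int) else -1 := by
  have := findgo_eq c w 0
  simpa [PySem.Chars.find] using this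

theorem singleton_isPrefixOf_iff (c : Char) (l : List Char) :
    [c].isPrefixOf l = true ↔ l[0]? = some c := by
  cases l with
  | nil => simp [List.isPrefixOf]
  | cons a t =>
    simp only [List.isPrefixOf, Bool.and_true, List.getElem?_cons_zero, Option.some.injEq]
    constructor
    · intro h; exact ((beq_iff_eq).mp h).symm
    · intro h; exact (beq_iff_eq).mpr h.symm

theorem rfindgo_spec (w : List Char) (c : Char) : ∀ j : Nat, j ≤ w.length →
    (PySem.Chars.rfind.go w [c] j = -1 ∧ ∀ m : Nat, m ≤ j → ∀ hm : m < w.length, w[m] ≠ c) ∨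
    (∃ m : Nat, ∃ hm : m < w.length, m ≤ j ∧ PySem.Chars.rfind.go w [c] j = (m : Int) ∧
      w[m] = c ∧ ∀ m' : Nat, m < m' → m' ≤ j → ∀ hm' : m' < w.length, w[m'] ≠ c) := by
  intro j
  induction j with
  | zero =>
    intro hj
    rw [PySem.Chars.rfind.go]
    by_cases hp : [c].isPrefixOf w = true
    · have h0 : w[0]? = some c := (singleton_isPrefixOf_iff c w).mp hp
      have hlen : 0 < w.length := by
        cases w
        · simp at h0
        · simp
      right
      refine ⟨0, hlen, le_refl _, by simp [hp], ?_, ?_⟩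
      · have := List.getElem?_eq_getElem (l := w) (i := 0) hlen
        rw [this] at h0; injection h0
      · intro m' hm' hle _; omega
    · left
      refine ⟨by simp [hp], ?_⟩
      intro m hm hlt
      have hm0 : m = 0 := by omega
      subst hm0
      intro hc
      exact hp ((singleton_isPrefixOf_iff c w).mpr (by rw [List.getElem?_eq_getElem hlt, hc]))
  | succ j ih =>
    intro hj
    rw [PySem.Chars.rfind.go]
    by_cases hp : [c].isPrefixOf (w.drop (j+1)) = true
    · have h0 : w[j+1]? = some c := by
        have := (singleton_isPrefixOf_iff c (w.drop (j+1))).mp hp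
        simpa [List.getElem?_drop] using this
      have hlen : j + 1 < w.length := by
        by_contra hcon
        rw [List.getElem?_eq_none_iff.mpr (by omega)] at h0
        simp at h0
      right
      refine ⟨j+1, hlen, le_refl _, by simp [hp], ?_, ?_⟩
      · have := List.getElem?_eq_getElem (l := w) (i := j+1) hlen
        rw [this] at h0; injection h0
      · intro m' hm' hle _; omega
    · have hnot : ∀ hm : j + 1 < w.length, w[j+1] ≠ c := by
        intro hm hc
        exact hp ((singleton_isPrefixOf_iff c (w.drop (j+1))).mpr
          (by rw [List.getElem?_drop, List.getElem?_eq_getElem hm, hc]))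
      rcases ih (by omega) with ⟨hv, hall⟩ | ⟨m, hm, hle, hv, hc, hmax⟩
      · left
        refine ⟨by simp [hp, hv], ?_⟩
        intro m hmle hlt
        rcases Nat.lt_or_ge m (j+1) with h | h
        · exact hall m (by omega) hlt
        · have : m = j + 1 := by omega
          subst this; exact hnot hlt
      · right
        refine ⟨m, hm, by omega, by simp [hp, hv], hc, ?_⟩
        intro m' hgt hle' hlt'
        rcases Nat.lt_or_ge m' (j+1) with h | h
        · exact hmax m' hgt (by omega) hlt'
        · have : m' = j + 1 := by omega
          subst this; exact hnot hlt'

theorem rfind_singleton_spec (w : List Char) (c : Char) :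
    (PySem.Chars.rfind w [c] = -1 ∧ ∀ m : Nat, ∀ hm : m < w.length, w[m] ≠ c) ∨
    (∃ m : Nat, ∃ hm : m < w.length, PySem.Chars.rfind w [c] = (m : Int) ∧
      w[m] = c ∧ ∀ m' : Nat, m < m' → ∀ hm' : m' < w.length, w[m'] ≠ c) := by
  rcases rfindgo_spec w c w.length (le_refl _) with ⟨hv, hall⟩ | ⟨m, hm, hle, hv, hc, hmax⟩
  · left
    exact ⟨by simpa [PySem.Chars.rfind] using hv, fun m hm => hall m (by omega) hm⟩
  · right
    exact ⟨m, hm, by simpa [PySem.Chars.rfind] using hv, hc,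
      fun m' h1 hm' => hmax m' h1 (by omega) hm'⟩

theorem findFrom_norm (cs : List Char) (sub : List Char) (first last : Int)
    (h0 : 0 ≤ first) (h1 : -1 ≤ last) (h2 : last < (cs.length : Int)) (h3 : first ≤ last + 1) :
    PySem.Chars.findFrom cs sub first (some (last + 1)) =
      (if PySem.Chars.find ((cs.take (last + 1).toNat).drop first.toNat) sub = -1 then -1
       else first + PySem.Chars.find ((cs.take (last + 1).toNat).drop first.toNat) sub) := by
  rw [PySem.Chars.findFrom]
  split_ifs with hA hB hC hD <;> first | rfl | omega | skip
  all_goals simp_all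

theorem rfindFrom_norm (cs : List Char) (sub : List Char) (first last : Int)
    (h0 : 0 ≤ first) (h1 : -1 ≤ last) (h2 : last < (cs.length : Int)) (h3 : first ≤ last + 1) :
    PySem.Chars.rfindFrom cs sub first (some (last + 1)) =
      (if PySem.Chars.rfind ((cs.take (last + 1).toNat).drop first.toNat) sub = -1 then -1
       else first + PySem.Chars.rfind ((cs.take (last + 1).toNat).drop first.toNat) sub) := by
  rw [PySem.Chars.rfindFrom]
  split_ifs with hA hB hC hD <;> first | rfl | omega | skip
  all_goals simp_all


theorem mem_posL (cs : List Char) (c : Char) (p : Int) :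
    p ∈ posL cs c ↔ ∃ k : Nat, ∃ hk : k < cs.length, p = (k : Int) ∧ cs[k] = c := by
  simp only [posL, List.mem_map, List.mem_filter]
  constructor
  · rintro ⟨⟨i, a⟩, ⟨hmem, ha⟩, rfl⟩
    rcases (PySem.List.mem_enumerate_iff cs 0 (i, a)).mp hmem with ⟨k, hk, hpk⟩
    refine ⟨k, hk, ?_, ?_⟩
    · injection hpk with h1 h2; simp [h1]
    · injection hpk with h1 h2; simp only [beq_iff_eq] at ha; rw [← h2]; exact ha
  · rintro ⟨k, hk, rfl, hc⟩
    exact ⟨((k : Int), c), ⟨(PySem.List.mem_enumerate_iff cs 0 _).mpr ⟨k, hk, by simp [hc]⟩,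
      by simp⟩, rfl⟩

theorem pairwise_posL (cs : List Char) (c : Char) : (posL cs c).Pairwise (· < ·) := by
  have h1 : ((PySem.List.enumerate cs 0).filter (fun p => p.2 == c)).Pairwise
      (fun p q => p.1 < q.1) := (PySem.List.pairwise_lt_enumerate cs 0).filter _
  exact h1.map _ (fun a b h => h)

theorem length_posL (cs : List Char) (c : Char) :
    (posL cs c).length = cs.countP (fun x => x == c) := by
  rw [posL, List.length_map, ← List.countP_eq_length_filter]
  conv_rhs => rw [← PySem.List.map_snd_enumerate cs 0]
  rw [List.countP_map]
  rfl

theorem countP_disj {α : Type} (l : List α) (p q : α → Bool) (hdisj : ∀ x ∈ l, ¬(p x = true ∧ q x = true)) :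
    l.countP (fun x => p x || q x) = l.countP p + l.countP q := by
  induction l with
  | nil => simp
  | cons a t ih =>
    have ht := ih (fun x hx => hdisj x (List.mem_cons_of_mem a hx))
    have ha := hdisj a List.mem_cons_self
    by_cases hpa : p a = true <;> by_cases hqa : q a = true
    · exact absurd ⟨hpa, hqa⟩ ha
    all_goals simp [List.countP_cons, hpa, hqa, ht] <;> omega

theorem cnt_le_of_pairwise (ps : List Int) (hps : ps.Pairwise (· ≤ ·)) (x : Int)
    (idx : Nat) (hidx : idx < ps.length) :
    idx < ps.countP (fun v => decide (v < x)) ↔ ps[idx] < x := by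
  induction ps generalizing idx with
  | nil => simp at hidx
  | cons a t ih =>
    have hpt : t.Pairwise (· ≤ ·) := hps.of_cons
    have hall : ∀ y ∈ t, a ≤ y := fun y hy => List.rel_of_pairwise_cons hps hy
    by_cases hax : a < x
    · rw [List.countP_cons, show (if decide (a < x) = true then 1 else 0) = 1 by simp [hax]]
      cases idx with
      | zero =>
        simp only [List.getElem_cons_zero]
        exact ⟨fun _ => hax, fun _ => by omega⟩
      | succ k =>
        simp only [List.getElem_cons_succ]
        rw [← ih hpt k (by simpa using hidx)]
        omega
    · have hzero : t.countP (fun v => decide (v < x)) = 0 := by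
        rw [List.countP_eq_zero]
        intro y hy
        simp only [decide_eq_true_eq]
        have := hall y hy; omega
      rw [List.countP_cons, hzero, show (if decide (a < x) = true then 1 else 0) = 0 by simp [hax]]
      cases idx with
      | zero =>
        simp only [List.getElem_cons_zero]
        constructor
        · intro h; omega
        · intro h; exact absurd h hax
      | succ k =>
        simp only [List.getElem_cons_succ]
        constructor
        · intro h; omega
        · intro hlt
          have hk : k < t.length := by simpa using hidx
          have h1 : a ≤ t[k] := hall _ (List.getElem_mem hk)
          exact absurd (by omega : a < x) hax

theorem countP_eq_of_boundary (ps : List Int) (p : Int → Bool) (m : Nat) (hm : m ≤ ps.length)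
    (h : ∀ idx : Nat, ∀ hidx : idx < ps.length, (p ps[idx] = true ↔ idx < m)) :
    ps.countP p = m := by
  have hsplit : ps = ps.take m ++ ps.drop m := (List.take_append_drop m ps).symm
  rw [hsplit, List.countP_append]
  have h1 : (ps.take m).countP p = (ps.take m).length := by
    rw [List.countP_eq_length]
    intro a ha
    rcases List.mem_iff_getElem.mp ha with ⟨idx, hidx, rfl⟩
    have hlt : idx < ps.length := by
      have := hidx; simp [List.length_take] at this; omega
    rw [List.getElem_take]
    exact (h idx hlt).mpr (by have := hidx; simp [List.length_take] at this; omega)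
  have h2 : (ps.drop m).countP p = 0 := by
    rw [List.countP_eq_zero]
    intro a ha
    rcases List.mem_iff_getElem.mp ha with ⟨idx, hidx, rfl⟩
    have hlt : m + idx < ps.length := by
      have := hidx; simp [List.length_drop] at this; omega
    rw [List.getElem_drop]
    intro hp
    exact absurd ((h (m + idx) hlt).mp hp) (by omega)
  rw [h1, h2, List.length_take]
  omega

theorem lb_spec (ps : List Int) (hps : ps.Pairwise (· ≤ ·)) (x : Int) :
    ∀ fuel : Nat, ∀ lo hi : Int, (hi - lo).toNat ≤ fuel →
    0 ≤ lo → lo ≤ hi → hi ≤ (ps.length : Int) →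
    (∀ idx : Nat, ∀ hidx : idx < ps.length, idx < lo.toNat → ps[idx] < x) →
    (∀ idx : Nat, ∀ hidx : idx < ps.length, hi.toNat ≤ idx → ¬ ps[idx] < x) →
    bwtLb ps x lo hi = (ps.countP (fun v => decide (v < x)) : Int) := by
  intro fuel
  induction fuel with
  | zero =>
    intro lo hi hfuel h0 h1 h2 hlow hhigh
    have heq : lo = hi := by omega
    subst heq
    rw [bwtLb, if_pos (le_refl _)]
    have : ps.countP (fun v => decide (v < x)) = lo.toNat := by
      apply countP_eq_of_boundary _ _ _ (by omega)
      intro idx hidx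
      simp only [decide_eq_true_eq]
      constructor
      · intro hlt
        by_contra hcon
        exact (hhigh idx hidx (by omega)) hlt
      · intro hlt; exact hlow idx hidx hlt
    rw [this]; omega
  | succ f ih =>
    intro lo hi hfuel h0 h1 h2 hlow hhigh
    rw [bwtLb]
    by_cases hlh : lo ≥ hi
    · rw [if_pos hlh]
      have heq : lo = hi := by omega
      subst heq
      have : ps.countP (fun v => decide (v < x)) = lo.toNat := by
        apply countP_eq_of_boundary _ _ _ (by omega)
        intro idx hidx
        simp only [decide_eq_true_eq]
        exact ⟨fun hlt => by by_contra hcon; exact (hhigh idx hidx (by omega)) hlt,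
               fun hlt => hlow idx hidx hlt⟩
      rw [this]; omega
    · rw [if_neg hlh]
      have hmid := PySem.Int.floordiv_two_mid_bounds (lo := lo) (hi := hi) (by omega)
      have hmidlt : PySem.Int.floordiv (lo + hi) 2 < hi :=
        (PySem.Int.floordiv_lt_iff_lt_mul (by omega)).mpr (by omega)
      set mid := PySem.Int.floordiv (lo + hi) 2 with hmiddef
      have hmrange : 0 ≤ mid ∧ mid < (ps.length : Int) := ⟨by omega, by omega⟩
      have hget : PySem.List.pyGetD ps mid 0 = ps[mid.toNat]'(by omega) :=
        PySem.List.pyGetD_eq_getElem _ _ (by omega) (by omega)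
      show (if PySem.List.pyGetD ps mid 0 < x then bwtLb ps x (mid + 1) hi
            else bwtLb ps x lo mid) = (ps.countP (fun v => decide (v < x)) : Int)
      rw [hget]
      by_cases hcmp : ps[mid.toNat]'(by omega) < x
      · rw [if_pos hcmp]
        apply ih (mid + 1) hi (by omega) (by omega) (by omega) h2 _ hhigh
        intro idx hidx hlt
        have hle : ps[idx] ≤ ps[mid.toNat]'(by omega) := by
          rcases Nat.lt_or_ge idx mid.toNat with h | h
          · exact List.pairwise_iff_getElem.mp hps idx mid.toNat hidx (by omega) h
          · have : idx = mid.toNat := by omega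
            subst this; exact le_refl _
        omega
      · rw [if_neg hcmp]
        apply ih lo mid (by omega) (by omega) (by omega) (by omega) hlow
        intro idx hidx hge
        intro hlt
        apply hcmp
        rcases Nat.lt_or_ge mid.toNat idx with h | h
        · have := List.pairwise_iff_getElem.mp hps mid.toNat idx (by omega) hidx h
          omega
        · have : idx = mid.toNat := by omega
          subst this; exact hlt

theorem sorted_grouped (l : List (Int × Char)) (hdom : ∀ p ∈ l, p.2.toNat < 127) :
    PySem.List.sorted l (fun x => x.2) false =
      (List.range 127).flatMap (fun k => l.filter (fun p => p.2.toNat == k)) := by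
  induction l using List.reverseRecOn with
  | nil => simp [PySem.List.sorted]
  | append_singleton t x ih =>
    rw [PySem.List.sorted_eq_foldl_insertBy, List.foldl_append]
    rw [← PySem.List.sorted_eq_foldl_insertBy]
    rw [ih (fun p hp => hdom p (List.mem_append_left _ hp))]
    simp only [List.foldl_cons, List.foldl_nil]
    rw [insert_grouped x (List.range 127) _ (List.pairwise_lt_range)
      (List.mem_range.mpr (hdom x (List.mem_append_right _ List.mem_cons_self)))
      (fun k _ p hp => by
        have := (List.mem_filter.mp hp).2
        exact beq_iff_eq.mp this)]
    apply List.flatMap_congr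
    intro k _
    rw [List.filter_append]
    by_cases hk : k = x.2.toNat
    · subst hk
      rw [if_pos rfl]
      simp [List.filter_cons]
    · rw [if_neg hk]
      have : (x.2.toNat == k) = false := by simp [Ne.symm hk]
      simp [List.filter_cons, this]

-- ---------- the first column: temp as concatenation of per-character buckets ----------

theorem filter_bucket_eq (cs : List Char) (c : Char) :
    (PySem.List.enumerate cs 0).filter (fun p => p.2.toNat == c.toNat) =
      (PySem.List.enumerate cs 0).filter (fun p => p.2 == c) := by
  apply List.filter_congr
  intro p _
  by_cases h : p.2 = c
  · simp [h]
  · have : p.2.toNat ≠ c.toNat := fun hc => h (charToNat_inj _ _ hc)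
    simp [h, this]

theorem countP_toNat_lt (l : List (Int × Char)) (m : Nat) :
    ((List.range m).flatMap (fun k => l.filter (fun p => p.2.toNat == k))).length =
      l.countP (fun p => decide (p.2.toNat < m)) := by
  induction m with
  | zero => simp
  | succ m ih =>
    rw [List.range_succ, List.flatMap_append, List.length_append, ih]
    simp only [List.flatMap_cons, List.flatMap_nil, List.append_nil]
    rw [← List.countP_eq_length_filter]
    have hs : l.countP (fun p => decide (p.2.toNat < m + 1)) =
        l.countP (fun p => decide (p.2.toNat < m) || (p.2.toNat == m)) := by
      apply List.countP_congr
      intro p _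
      by_cases h1 : p.2.toNat < m
      · simp [h1, show p.2.toNat < m + 1 by omega]
      · by_cases h2 : p.2.toNat = m
        · simp [h2]
        · simp [h1, h2, show ¬ p.2.toNat < m + 1 by omega]
    rw [hs, countP_disj]
    intro p _ ⟨ha, hb⟩
    simp only [decide_eq_true_eq] at ha
    exact absurd (beq_iff_eq.mp hb) (by omega)

theorem cntLT_enum (cs : List Char) (c : Char) :
    (PySem.List.enumerate cs 0).countP (fun p => decide (p.2.toNat < c.toNat)) = cntLT cs c := by
  rw [cntLT]
  conv_rhs => rw [← PySem.List.map_snd_enumerate cs 0]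
  rw [List.countP_map]
  apply List.countP_congr
  intro p _
  by_cases h : p.2 < c
  · simp [h, Function.comp, (char_lt_iff_toNat _ _).mp h]
  · have : ¬ p.2.toNat < c.toNat := fun hc => h ((char_lt_iff_toNat _ _).mpr hc)
    simp [h, Function.comp, this]

theorem temp_split (cs : List Char) (c : Char)
    (hdom : ∀ ch ∈ cs, ch.toNat < 127) (hc : c.toNat < 127) :
    ∃ P S : List Int, tempF cs = P ++ posL cs c ++ S ∧ P.length = cntLT cs c := by
  have hd : ∀ p ∈ PySem.List.enumerate cs 0, p.2.toNat < 127 := by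
    intro p hp
    rcases (PySem.List.mem_enumerate_iff cs 0 p).mp hp with ⟨k, hk, rfl⟩
    exact hdom _ (List.getElem_mem hk)
  have hsg := sorted_grouped (PySem.List.enumerate cs 0) hd
  have hsplit : List.range 127 =
      List.range c.toNat ++ [c.toNat] ++ ((List.range (126 - c.toNat)).map (fun j => c.toNat + 1 + j)) := by
    have h1 : (127 : Nat) = c.toNat + 1 + (126 - c.toNat) := by omega
    rw [h1, List.range_add, List.range_add]
    simp [List.range_one, List.map_map, Function.comp, Nat.add_assoc]
  refine ⟨((List.range c.toNat).flatMap
      (fun k => (PySem.List.enumerate cs 0).filter (fun p => p.2.toNat == k))).map (fun p => p.1),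
    (((List.range (126 - c.toNat)).map (fun j => c.toNat + 1 + j)).flatMap
      (fun k => (PySem.List.enumerate cs 0).filter (fun p => p.2.toNat == k))).map (fun p => p.1),
    ?_, ?_⟩
  · rw [tempF, hsg, hsplit]
    rw [List.flatMap_append, List.flatMap_append, List.map_append, List.map_append]
    congr 1
    congr 1
    rw [List.flatMap_cons, List.flatMap_nil, List.append_nil, filter_bucket_eq, posL]
  · rw [List.length_map, countP_toNat_lt, cntLT_enum]

theorem nodup_tempF (cs : List Char) : (tempF cs).Nodup := by
  have hperm : (PySem.List.sorted (PySem.List.enumerate cs 0) (fun x => x.2) false).Perm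
      (PySem.List.enumerate cs 0) := PySem.List.sorted_perm _ _ _
  have hmap := hperm.map (fun p : Int × Char => p.1)
  have : ((PySem.List.enumerate cs 0).map (fun p : Int × Char => p.1)).Nodup := by
    rw [PySem.List.map_fst_enumerate]
    exact PySem.List.nodup_pyRange_one _ _
  exact hmap.nodup_iff.mpr this

-- ---------- the l2f dictionary ----------

theorem l2f_fold_pres (t : List Int) (l : Int) (hl : l ∉ t) :
    ∀ (d : PySem.Dict Int Int) (s : Int) (v : Int),
    ((PySem.List.enumerate t s).foldl (fun d p => d.insert p.2 p.1) d).getD l v = d.getD l v := by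
  induction t with
  | nil => intro d s v; simp [PySem.List.enumerate_nil]
  | cons a t ih =>
    intro d s v
    rw [PySem.List.enumerate_cons, List.foldl_cons]
    rw [ih (fun h => hl (List.mem_cons_of_mem _ h))]
    rw [PySem.Dict.getD_insert]
    rw [if_neg (fun h => hl (by rw [h]; exact List.mem_cons_self))]

theorem l2f_fold_getD (t : List Int) (hnd : t.Nodup) (l : Int) (hl : l ∈ t) :
    ∀ (d : PySem.Dict Int Int) (s : Int),
    ((PySem.List.enumerate t s).foldl (fun d p => d.insert p.2 p.1) d).getD l 0 =
      s + (t.idxOf l : Int) := by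
  induction t with
  | nil => simp at hl
  | cons a t ih =>
    intro d s
    rw [PySem.List.enumerate_cons, List.foldl_cons]
    by_cases hla : l = a
    · subst hla
      have hnot : l ∉ t := (List.nodup_cons.mp hnd).1
      rw [l2f_fold_pres t l hnot]
      rw [PySem.Dict.getD_insert_self, List.idxOf_cons_self]
      simp
    · have hlt : l ∈ t := by
        rcases List.mem_cons.mp hl with h | h
        · exact absurd h hla
        · exact h
      rw [ih (List.nodup_cons.mp hnd).2 hlt _ (s + 1)]
      have : (a :: t).idxOf l = t.idxOf l + 1 := by
        rw [List.idxOf_cons]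
        have hba : (a == l) = false := by simp [Ne.symm hla]
        rw [hba]
        rfl
      rw [this]
      push_cast
      ring

theorem rank_lemma (cs : List Char) (c : Char)
    (hdom : ∀ ch ∈ cs, ch.toNat < 127) (hc : c.toNat < 127)
    (k : Nat) (hk : k < (posL cs c).length) :
    (l2fF cs).getD ((posL cs c)[k]) 0 = (cntLT cs c : Int) + (k : Int) := by
  rcases temp_split cs c hdom hc with ⟨P, S, hsplit, hlen⟩
  have hnd := nodup_tempF cs
  have hidx : P.length + k < (tempF cs).length := by
    rw [hsplit]
    simp only [List.length_append]
    omega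
  have hassoc : tempF cs = P ++ (posL cs c ++ S) := by rw [hsplit, List.append_assoc]
  have hget? : (tempF cs)[P.length + k]? = some ((posL cs c)[k]) := by
    rw [hassoc, List.getElem?_append_right (by omega)]
    have h1 : P.length + k - P.length = k := by omega
    rw [h1, List.getElem?_append_left hk, List.getElem?_eq_getElem hk]
  have hget : (tempF cs)[P.length + k]'hidx = (posL cs c)[k] := by
    have h2 := List.getElem?_eq_getElem hidx
    rw [h2] at hget?
    injection hget?
  have hmem : (posL cs c)[k] ∈ tempF cs := by
    rw [← hget]; exact List.getElem_mem hidx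
  have := l2f_fold_getD (tempF cs) hnd _ hmem PySem.Dict.empty 0
  rw [l2fF, this]
  have hio : (tempF cs).idxOf ((posL cs c)[k]) = P.length + k := by
    rw [← hget]
    exact hnd.idxOf_getElem _ _
  rw [hio, hlen]
  push_cast
  ring
-- ---------- the occ dictionary ----------

theorem occF_getD (cs : List Char) (c : Char) : (occF cs).getD c [] = posL cs c := by
  rw [occF]
  have hfold : (PySem.List.enumerate cs 0).foldl
      (fun d p => d.modify p.2 [] (fun v => v ++ [p.1])) PySem.Dict.empty =
      ((PySem.List.enumerate cs 0).map Prod.swap).foldl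
      (fun d p => d.modify p.1 [] (fun v => v ++ [p.2])) PySem.Dict.empty := by
    rw [List.foldl_map]
    rfl
  rw [hfold, PySem.Dict.getD_foldl_modify_append]
  rw [PySem.Dict.getD_empty, List.nil_append]
  rw [List.filter_map, List.map_map, posL]
  rfl

theorem occF_keys (cs : List Char) : (occF cs).keys = PySem.Set.ofList cs := by
  rw [occF]
  have h := PySem.Dict.keys_foldl_modify_key (l := PySem.List.enumerate cs 0)
    (key := fun p : Int × Char => p.2) (d0 := ([] : List Int))
    (f := fun _ p => (fun v => v ++ [p.1])) (d := PySem.Dict.empty)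
  rw [h, PySem.Dict.keys_empty, PySem.Set.update_nil_left, PySem.List.map_snd_enumerate]

theorem occF_get? (cs : List Char) (c : Char) :
    (occF cs).get? c = if c ∈ cs then some (posL cs c) else none := by
  by_cases hmem : c ∈ cs
  · rw [if_pos hmem]
    cases hq : (occF cs).get? c with
    | none =>
      have : c ∉ (occF cs).keys := (PySem.Dict.get?_eq_none_iff_not_mem_keys _ _).mp hq
      rw [occF_keys] at this
      exact absurd ((PySem.Set.mem_ofList cs c).mpr hmem) this
    | some v =>
      have := PySem.Dict.getD_of_get?_eq_some (d0 := ([] : List Int)) (h := hq)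
      rw [occF_getD] at this
      rw [this]
  · rw [if_neg hmem]
    apply (PySem.Dict.get?_eq_none_iff_not_mem_keys _ _).mpr
    rw [occF_keys]
    intro h
    exact hmem ((PySem.Set.mem_ofList cs c).mp h)

-- ---------- the start dictionary ----------

theorem start_fold_pres (f : Char → Int) (ks : List Char) (c : Char) (hc : c ∉ ks) :
    ∀ (d : PySem.Dict Char Int) (t : Int),
    ((ks.foldl (fun st ch => (st.1.insert ch st.2, st.2 + f ch)) (d, t)).1).getD c 0 = d.getD c 0 := by
  induction ks with
  | nil => intro d t; rfl
  | cons k ks ih =>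
    intro d t
    rw [List.foldl_cons, ih (fun h => hc (List.mem_cons_of_mem _ h))]
    rw [PySem.Dict.getD_insert]
    rw [if_neg (fun h => hc (by rw [h]; exact List.mem_cons_self))]

theorem start_fold_getD (f : Char → Int) (ks : List Char) (hks : ks.Pairwise (· < ·))
    (c : Char) (hc : c ∈ ks) :
    ∀ (d : PySem.Dict Char Int) (t : Int),
    ((ks.foldl (fun st ch => (st.1.insert ch st.2, st.2 + f ch)) (d, t)).1).getD c 0 =
      t + ((ks.filter (fun x => decide (x < c))).map f).sum := by
  induction ks with
  | nil => simp at hc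
  | cons k ks ih =>
    intro d t
    have hkall : ∀ j ∈ ks, k < j := fun j hj => List.rel_of_pairwise_cons hks hj
    rw [List.foldl_cons]
    by_cases hkc : k = c
    · subst hkc
      have hnot : k ∉ ks := fun h => absurd (hkall _ h) (lt_irrefl _)
      rw [start_fold_pres f ks k hnot, PySem.Dict.getD_insert_self]
      have hfilter : (k :: ks).filter (fun x => decide (x < k)) = [] := by
        rw [List.filter_cons]
        simp only [decide_eq_true_eq, lt_irrefl, if_false]
        rw [List.filter_eq_nil_iff]
        intro a ha
        simp only [decide_eq_true_eq]
        exact not_lt.mpr (le_of_lt (hkall _ ha))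
      rw [hfilter]
      simp
    · have hcks : c ∈ ks := by
        rcases List.mem_cons.mp hc with h | h
        · exact absurd h.symm hkc
        · exact h
      rw [ih hks.of_cons hcks _ (t + f k)]
      have hfilter : (k :: ks).filter (fun x => decide (x < c)) =
          k :: ks.filter (fun x => decide (x < c)) := by
        rw [List.filter_cons]
        simp only [decide_eq_true_eq]
        rw [if_pos (hkall _ hcks)]
      rw [hfilter]
      simp only [List.map_cons, List.sum_cons]
      ring

theorem sum_count_nodup (cs : List Char) (ds : List Char) (hnd : ds.Nodup) :
    (ds.map (fun d => cs.countP (fun x => x == d))).sum =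
      cs.countP (fun x => decide (x ∈ ds)) := by
  induction ds with
  | nil => simp
  | cons d ds ih =>
    have hd : d ∉ ds := (List.nodup_cons.mp hnd).1
    rw [List.map_cons, List.sum_cons, ih (List.nodup_cons.mp hnd).2]
    have : cs.countP (fun x => decide (x ∈ d :: ds)) =
        cs.countP (fun x => (x == d) || decide (x ∈ ds)) := by
      apply List.countP_congr
      intro x _
      by_cases h1 : x = d
      · simp [h1]
      · simp [h1]
    rw [this, countP_disj]
    intro x _ ⟨ha, hb⟩
    have h1 : x = d := beq_iff_eq.mp ha
    have h2 : x ∈ ds := of_decide_eq_true hb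
    exact hd (h1 ▸ h2)

theorem startF_getD (cs : List Char) (c : Char) (hmem : c ∈ cs) :
    (startF cs).getD c 0 = (cntLT cs c : Int) := by
  rw [startF]
  set ks := PySem.List.sorted (occF cs).keys (fun x => x) false with hksdef
  have hksp : ks.Pairwise (· < ·) := by
    rw [hksdef, occF_keys]
    exact PySem.List.sorted_ofList_pairwise_lt cs
  have hmemks : ∀ x, x ∈ ks ↔ x ∈ cs := by
    intro x
    rw [hksdef, PySem.List.mem_sorted, occF_keys, PySem.Set.mem_ofList]
  rw [start_fold_getD _ ks hksp c ((hmemks c).mpr hmem)]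
  have hmapped : (ks.filter (fun x => decide (x < c))).map
      (fun ch => (((occF cs).getD ch []).length : Int)) =
      (ks.filter (fun x => decide (x < c))).map
      (fun ch => ((cs.countP (fun x => x == ch) : Nat) : Int)) := by
    apply List.map_congr_left
    intro ch _
    rw [occF_getD, length_posL]
  rw [hmapped]
  have hsum : ((ks.filter (fun x => decide (x < c))).map
      (fun ch => ((cs.countP (fun x => x == ch) : Nat) : Int))).sum =
      (((ks.filter (fun x => decide (x < c))).map
      (fun ch => cs.countP (fun x => x == ch))).sum : Int) := by
    generalize ks.filter (fun x => decide (x < c)) = ds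
    induction ds with
    | nil => simp
    | cons a t ih => simp [ih]
  rw [hsum, sum_count_nodup cs _ ((hksp.filter _).nodup)]
  have hfin : cs.countP (fun x => decide (x ∈ ks.filter (fun y => decide (y < c)))) =
      cs.countP (fun x => decide (x < c)) := by
    apply List.countP_congr
    intro x hx
    by_cases h1 : x < c
    · simp [List.mem_filter, h1, (hmemks x).mpr hx]
    · simp [List.mem_filter, h1]
  rw [hfin, cntLT]
  simp
-- ---------- occurrences in A's window vs. counted positions ----------

theorem idxOf_min (w : List Char) (c : Char) (m : Nat) (hm : m < w.idxOf c) (hml : m < w.length) :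
    w[m] ≠ c := by
  have h := List.not_of_lt_findIdx (p := (· == c)) (xs := w) (i := m)
    (by simpa [List.idxOf] using hm)
  simpa using h

theorem idxOf_min' (w : List Char) (c : Char) (m : Nat) (hml : m < w.length) (h : w[m] = c) :
    w.idxOf c ≤ m := by
  by_contra hcon
  exact idxOf_min w c m (by omega) hml h

theorem posL_getElem (cs : List Char) (c : Char) (idx : Nat) (hidx : idx < (posL cs c).length) :
    ∃ k : Nat, ∃ hk : k < cs.length, (posL cs c)[idx] = (k : Int) ∧ cs[k] = c :=
  (mem_posL cs c _).mp (List.getElem_mem hidx)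

theorem ps_mono (cs : List Char) (c : Char) (i j : Nat) (hj : j < (posL cs c).length)
    (hij : i ≤ j) : (posL cs c)[i]'(by omega) ≤ (posL cs c)[j] := by
  rcases Nat.lt_or_ge i j with h | h
  · exact le_of_lt (List.pairwise_iff_getElem.mp (pairwise_posL cs c) i j (by omega) hj h)
  · have : i = j := by omega
    subst this; exact le_refl _

theorem pos_in_window (cs : List Char) (c : Char) (first last : Int)
    (h0 : 0 ≤ first) (h1 : -1 ≤ last) (h2 : last < (cs.length : Int))
    (idx : Nat) (hidx : idx < (posL cs c).length)
    (hge : (posL cs c).countP (fun v => decide (v < first)) ≤ idx)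
    (hlt : idx < (posL cs c).countP (fun v => decide (v < last + 1))) :
    ∃ m : Nat, ∃ hm : m < ((cs.take (last + 1).toNat).drop first.toNat).length,
      ((cs.take (last + 1).toNat).drop first.toNat)[m] = c ∧
      first + (m : Int) = (posL cs c)[idx] := by
  have hiff := cnt_le_of_pairwise (posL cs c) ((pairwise_posL cs c).imp le_of_lt)
  rcases posL_getElem cs c idx hidx with ⟨k, hk, hkv, hkc⟩
  have hlo : ¬ (posL cs c)[idx] < first := by
    intro hcon
    exact absurd ((hiff first idx hidx).mpr hcon) (by omega)
  have hhi : (posL cs c)[idx] < last + 1 := (hiff (last + 1) idx hidx).mp hlt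
  have hwlen : ((cs.take (last + 1).toNat).drop first.toNat).length =
      (last + 1).toNat - first.toNat := by
    rw [List.length_drop, List.length_take]; omega
  refine ⟨k - first.toNat, by omega, ?_, by rw [hkv]; omega⟩
  rw [List.getElem_drop, List.getElem_take]
  have : first.toNat + (k - first.toNat) = k := by omega
  simp only [this]
  exact hkc

theorem window_in_pos (cs : List Char) (c : Char) (first last : Int)
    (h0 : 0 ≤ first) (h1 : -1 ≤ last) (h2 : last < (cs.length : Int))
    (m : Nat) (hm : m < ((cs.take (last + 1).toNat).drop first.toNat).length)
    (hc : ((cs.take (last + 1).toNat).drop first.toNat)[m] = c) :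
    ∃ idx : Nat, ∃ hidx : idx < (posL cs c).length,
      (posL cs c).countP (fun v => decide (v < first)) ≤ idx ∧
      idx < (posL cs c).countP (fun v => decide (v < last + 1)) ∧
      (posL cs c)[idx] = first + (m : Int) := by
  have hiff := cnt_le_of_pairwise (posL cs c) ((pairwise_posL cs c).imp le_of_lt)
  have hwlen : ((cs.take (last + 1).toNat).drop first.toNat).length =
      (last + 1).toNat - first.toNat := by
    rw [List.length_drop, List.length_take]; omega
  have hkc : cs[first.toNat + m]'(by omega) = c := by
    rw [← hc, List.getElem_drop, List.getElem_take]
  have hmem : ((first.toNat + m : Nat) : Int) ∈ posL cs c :=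
    (mem_posL cs c _).mpr ⟨first.toNat + m, by omega, rfl, hkc⟩
  rcases List.mem_iff_getElem.mp hmem with ⟨idx, hidx, hval⟩
  refine ⟨idx, hidx, ?_, ?_, by rw [hval]; push_cast; omega⟩
  · by_contra hcon
    have := (hiff first idx hidx).mp (by omega)
    rw [hval] at this
    omega
  · apply (hiff (last + 1) idx hidx).mpr
    rw [hval]
    push_cast
    omega

theorem step_none (cs : List Char) (c : Char) (first last : Int)
    (h0 : 0 ≤ first) (h1 : -1 ≤ last) (h2 : last < (cs.length : Int))
    (hge : (posL cs c).countP (fun v => decide (v < last + 1)) ≤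
           (posL cs c).countP (fun v => decide (v < first))) :
    PySem.Chars.find ((cs.take (last + 1).toNat).drop first.toNat) [c] = -1 := by
  rw [find_singleton]
  rw [if_neg]
  intro hmem
  rcases List.mem_iff_getElem.mp hmem with ⟨m, hm, hc⟩
  rcases window_in_pos cs c first last h0 h1 h2 m hm hc with ⟨idx, hidx, ha, hb, _⟩
  omega

theorem step_notin (cs : List Char) (c : Char) (first last : Int) (hnotin : c ∉ cs) :
    PySem.Chars.find ((cs.take (last + 1).toNat).drop first.toNat) [c] = -1 := by
  rw [find_singleton, if_neg]
  intro hmem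
  exact hnotin (List.mem_of_mem_take (List.mem_of_mem_drop hmem))

theorem step_find (cs : List Char) (c : Char) (first last : Int)
    (h0 : 0 ≤ first) (h1 : -1 ≤ last) (h2 : last < (cs.length : Int))
    (hlt : (posL cs c).countP (fun v => decide (v < first)) <
           (posL cs c).countP (fun v => decide (v < last + 1))) :
    0 ≤ PySem.Chars.find ((cs.take (last + 1).toNat).drop first.toNat) [c] ∧
    (posL cs c)[(posL cs c).countP (fun v => decide (v < first))]? =
      some (first + PySem.Chars.find ((cs.take (last + 1).toNat).drop first.toNat) [c]) := by
  set w := (cs.take (last + 1).toNat).drop first.toNat with hwdef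
  set cntf := (posL cs c).countP (fun v => decide (v < first)) with hcntf
  have hidxf : cntf < (posL cs c).length := lt_of_lt_of_le hlt List.countP_le_length
  rcases pos_in_window cs c first last h0 h1 h2 cntf hidxf (le_refl _) hlt with
    ⟨m, hm, hmc, hmv⟩
  have hcw : c ∈ w := by rw [← hmc]; exact List.getElem_mem hm
  rw [find_singleton, if_pos hcw]
  refine ⟨by positivity, ?_⟩
  rw [List.getElem?_eq_getElem hidxf]
  congr 1
  have hi0 : w.idxOf c < w.length := List.idxOf_lt_length_of_mem hcw
  have hic : w[w.idxOf c] = c := List.getElem_idxOf hi0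
  -- ps[cntf] <= first + idxOf
  rcases window_in_pos cs c first last h0 h1 h2 (w.idxOf c) hi0 hic with
    ⟨idx, hidx, haf, hal, hav⟩
  have hle1 : (posL cs c)[cntf]'hidxf ≤ first + (w.idxOf c : Int) := by
    rw [← hav]
    exact ps_mono cs c cntf idx hidx haf
  -- first + idxOf <= ps[cntf]
  have hle2 : first + (w.idxOf c : Int) ≤ (posL cs c)[cntf]'hidxf := by
    have := idxOf_min' w c m hm hmc
    omega
  omega

theorem step_rfind (cs : List Char) (c : Char) (first last : Int)
    (h0 : 0 ≤ first) (h1 : -1 ≤ last) (h2 : last < (cs.length : Int))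
    (hlt : (posL cs c).countP (fun v => decide (v < first)) <
           (posL cs c).countP (fun v => decide (v < last + 1))) :
    0 ≤ PySem.Chars.rfind ((cs.take (last + 1).toNat).drop first.toNat) [c] ∧
    (posL cs c)[(posL cs c).countP (fun v => decide (v < last + 1)) - 1]? =
      some (first + PySem.Chars.rfind ((cs.take (last + 1).toNat).drop first.toNat) [c]) := by
  set w := (cs.take (last + 1).toNat).drop first.toNat with hwdef
  set cntf := (posL cs c).countP (fun v => decide (v < first)) with hcntf
  set cntl := (posL cs c).countP (fun v => decide (v < last + 1)) with hcntl
  have hidxl : cntl - 1 < (posL cs c).length := by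
    have := List.countP_le_length (l := posL cs c) (p := fun v => decide (v < last + 1))
    omega
  rcases pos_in_window cs c first last h0 h1 h2 (cntl - 1) hidxl (by omega) (by omega) with
    ⟨m, hm, hmc, hmv⟩
  rcases rfind_singleton_spec w c with ⟨_, hnone⟩ | ⟨m1, hm1, hval, hc1, hmax⟩
  · exact absurd hmc (hnone m hm)
  · rw [hval]
    refine ⟨by positivity, ?_⟩
    rw [List.getElem?_eq_getElem hidxl]
    congr 1
    -- ps[cntl-1] >= first + m1  and  <=
    rcases window_in_pos cs c first last h0 h1 h2 m1 hm1 hc1 with ⟨idx, hidx, haf, hal, hav⟩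
    have hle1 : first + (m1 : Int) ≤ (posL cs c)[cntl - 1]'hidxl := by
      rw [← hav]
      exact ps_mono cs c idx (cntl - 1) hidxl (by omega)
    have hle2 : (posL cs c)[cntl - 1]'hidxl ≤ first + (m1 : Int) := by
      have hmle : m ≤ m1 := by
        by_contra hcon
        exact (hmax m (by omega) hm) hmc
      omega
    omega
-- ---------- the loops agree ----------

theorem cnt_bound (cs : List Char) (c : Char) :
    cntLT cs c + (posL cs c).length ≤ cs.length := by
  rw [length_posL, cntLT]
  rw [← countP_disj cs (fun x => decide (x < c)) (fun x => x == c)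
    (fun x _ ⟨ha, hb⟩ => absurd (beq_iff_eq.mp hb) (by
      intro h; subst h; exact absurd (of_decide_eq_true ha) (lt_irrefl _)))]
  exact List.countP_le_length

theorem lb_eval (ps : List Int) (hple : ps.Pairwise (· ≤ ·)) (x : Int) :
    bwtLb ps x 0 (ps.length : Int) = (ps.countP (fun v => decide (v < x)) : Int) := by
  apply lb_spec ps hple x ps.length 0 (ps.length : Int)
  · omega
  · omega
  · omega
  · omega
  · intro idx hidx hlt
    omega
  · intro idx hidx hge
    omega

theorem loop_eq (cs : List Char) (hdom : ∀ ch ∈ cs, ch.toNat < 127) :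
    ∀ (qr : List Char) (first last : Int),
    0 ≤ first → -1 ≤ last → last < (cs.length : Int) → first ≤ last + 1 →
    bwtLoopA cs (l2fF cs) qr.reverse first last = bwtLoopB (occF cs) (startF cs) qr first last := by
  intro qr
  induction qr with
  | nil =>
    intro first last h0 h1 h2 h3
    rw [List.reverse_nil, bwtLoopA, bwtLoopB, dif_pos rfl]
  | cons c rest ih =>
    intro first last h0 h1 h2 h3
    rw [List.reverse_cons, bwtLoopA, bwtLoopB]
    have hne : rest.reverse ++ [c] ≠ [] := by simp
    rw [dif_neg hne]
    have hlast : (rest.reverse ++ [c]).getLast hne = c := List.getLast_concat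
    have hdrop : (rest.reverse ++ [c]).dropLast = rest.reverse := List.dropLast_concat
    rw [hlast, hdrop]
    show (if PySem.Chars.findFrom cs [c] first (some (last + 1)) = -1 ∨
            PySem.Chars.rfindFrom cs [c] first (some (last + 1)) = -1 then 0
          else bwtLoopA cs (l2fF cs) rest.reverse
            ((l2fF cs).getD (PySem.Chars.findFrom cs [c] first (some (last + 1))) 0)
            ((l2fF cs).getD (PySem.Chars.rfindFrom cs [c] first (some (last + 1))) 0)) =
         (match (occF cs).get? c with
          | none => 0
          | some ps =>
            if bwtLb ps first 0 (ps.length : Int) ≥ bwtLb ps (last + 1) 0 (ps.length : Int) then 0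
            else bwtLoopB (occF cs) (startF cs) rest
              ((startF cs).getD c 0 + bwtLb ps first 0 (ps.length : Int))
              ((startF cs).getD c 0 + bwtLb ps (last + 1) 0 (ps.length : Int) - 1))
    rw [findFrom_norm cs [c] first last h0 h1 h2 h3,
        rfindFrom_norm cs [c] first last h0 h1 h2 h3]
    rw [occF_get?]
    by_cases hmem : c ∈ cs
    · rw [if_pos hmem]
      show _ =
         (if bwtLb (posL cs c) first 0 ((posL cs c).length : Int) ≥
             bwtLb (posL cs c) (last + 1) 0 ((posL cs c).length : Int) then 0
          else bwtLoopB (occF cs) (startF cs) rest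
            ((startF cs).getD c 0 + bwtLb (posL cs c) first 0 ((posL cs c).length : Int))
            ((startF cs).getD c 0 + bwtLb (posL cs c) (last + 1) 0 ((posL cs c).length : Int) - 1))
      have hple : (posL cs c).Pairwise (· ≤ ·) := (pairwise_posL cs c).imp le_of_lt
      rw [lb_eval _ hple first, lb_eval _ hple (last + 1)]
      set cntf := (posL cs c).countP (fun v => decide (v < first)) with hcntf
      set cntl := (posL cs c).countP (fun v => decide (v < last + 1)) with hcntl
      by_cases hij : cntl ≤ cntf
      · rw [step_none cs c first last h0 h1 h2 hij]
        rw [if_pos rfl]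
        rw [if_pos (Or.inl rfl)]
        rw [if_pos (show ((cntf : Int) ≥ (cntl : Int)) by exact_mod_cast hij)]

      · have hlt : cntf < cntl := by omega
        rcases step_find cs c first last h0 h1 h2 hlt with ⟨hfnn, hfval⟩
        rcases step_rfind cs c first last h0 h1 h2 hlt with ⟨hrnn, hrval⟩
        rw [if_neg (show ¬ PySem.Chars.find ((cs.take (last + 1).toNat).drop first.toNat) [c] = -1
          by omega)]
        rw [if_neg (show ¬ PySem.Chars.rfind ((cs.take (last + 1).toNat).drop first.toNat) [c] = -1
          by omega)]
        rw [if_neg (show ¬ (first + PySem.Chars.find ((cs.take (last + 1).toNat).drop first.toNat) [c] = -1 ∨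
            first + PySem.Chars.rfind ((cs.take (last + 1).toNat).drop first.toNat) [c] = -1)
          by push_neg; constructor <;> omega)]
        rw [if_neg (show ¬ ((cntf : Int) ≥ (cntl : Int)) by
          have : (cntf : Int) < (cntl : Int) := by exact_mod_cast hlt
          omega)]
        -- values of the two dictionary lookups
        have hcn : c.toNat < 127 := hdom c hmem
        have hidxf : cntf < (posL cs c).length := lt_of_lt_of_le hlt List.countP_le_length
        have hidxl : cntl - 1 < (posL cs c).length := by
          have := List.countP_le_length (l := posL cs c) (p := fun v => decide (v < last + 1))
          omega
        have hfval' : first + PySem.Chars.find ((cs.take (last + 1).toNat).drop first.toNat) [c]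
            = (posL cs c)[cntf] := by
          rw [List.getElem?_eq_getElem hidxf] at hfval
          injection hfval with h
          omega
        have hrval' : first + PySem.Chars.rfind ((cs.take (last + 1).toNat).drop first.toNat) [c]
            = (posL cs c)[cntl - 1] := by
          rw [List.getElem?_eq_getElem hidxl] at hrval
          injection hrval with h
          omega
        rw [hfval', hrval']
        rw [rank_lemma cs c hdom hcn cntf hidxf,
            rank_lemma cs c hdom hcn (cntl - 1) hidxl]
        rw [startF_getD cs c hmem]
        have hbound := cnt_bound cs c
        have harg : (cntLT cs c : Int) + ((cntl - 1 : Nat) : Int) =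
            (cntLT cs c : Int) + (cntl : Int) - 1 := by
          have : 1 ≤ cntl := by omega
          push_cast [this]
          omega
        rw [harg]
        apply ih
        · positivity
        · omega
        · have h1 : cntl ≤ (posL cs c).length := List.countP_le_length
          have : cntLT cs c + cntl ≤ cs.length := by omega
          omega
        · omega
    · rw [if_neg hmem]
      rw [step_notin cs c first last hmem]
      rw [if_pos rfl]
      rw [if_pos (Or.inl rfl)]
-- ===== VERDICT (by name: the statement is the Claim_ definition above) =====
theorem bwtQuery_spec : Claim_equal_bwtQuery := by
  intro text query hdomain
  have hdom : ∀ ch ∈ text.toList, ch.toNat < 127 := by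
    have h1 : pvDomStr text = true := by
      unfold Dom_bwtQuery at hdomain
      exact (Bool.and_eq_true _ _).mp hdomain |>.1
    intro ch hch
    have h2 := (List.all_eq_true.mp h1) ch hch
    unfold pvDomChar at h2
    simp only [Bool.or_eq_true, Bool.and_eq_true, beq_iff_eq, decide_eq_true_eq] at h2
    omega
  show bwtQuery text query = bwtQuery_alt text query
  rw [bwtQuery, bwtQuery_alt]
  show bwtLoopA text.toList (l2fF text.toList) query.toList 0 ((text.toList.length : Int) - 1) =
    bwtLoopB (occF text.toList) (startF text.toList) query.toList.reverse 0
      ((text.toList.length : Int) - 1)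
  have h := loop_eq text.toList hdom query.toList.reverse 0 ((text.toList.length : Int) - 1)
    (by omega) (by omega) (by omega) (by omega)
  rw [List.reverse_reverse] at h
  exact h
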